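-- pv_equiv track=rewrite | github.com/anushkapranjale/microproject | img_decode.py | binary_to_msg
-- ===== SOURCE A (Python) =====
-- def binary_to_msg(binary_data):
--     chars = []
--     for i in range(0, len(binary_data), 8):
--         byte = binary_data[i:i+8]
--         if byte == '11111110':  # End marker
--             break
--         chars.append(chr(int(byte, 2)))
--     return ''.join(chars)
-- ===== SOURCE B (Python) =====
-- def binary_to_msg(binary_data):
--     out = []
--     val = 0
--     nbits = 0
--     for ch in binary_data:
--         val = val * 2 + (1 if ch == '1' else 0)
--         nbits += 1
--         if nbits == 8:
--             if val == 254:  # end marker 11111110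
--                 return ''.join(out)
--             out.append(chr(val))
--             val = 0
--             nbits = 0
--     if nbits:
--         out.append(chr(val))
--     return ''.join(out)
-- ===== Notes on version B (the rewrite author's own statement) =====
-- stated objective: alternative
-- what changed: B replaces A's slice-a-chunk-then-int(byte,2) loop by a single character-level pass that accumulates each byte's value bit by bit (val = val*2 + bit), flushing every 8 bits and stopping when an 8-bit group equals 254 (the 11111110 marker); no slicing and no string-to-int parsing.
-- outside the precondition, e.g. on binary_to_msg('1 '): A returns '\x01', B returns '\x02'; on binary_to_msg('1_0'): A returns '\x02', B returns '\x04'; on binary_to_msg('12'): A raises ValueError, B returns '\x02'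
import Mathlib
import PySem

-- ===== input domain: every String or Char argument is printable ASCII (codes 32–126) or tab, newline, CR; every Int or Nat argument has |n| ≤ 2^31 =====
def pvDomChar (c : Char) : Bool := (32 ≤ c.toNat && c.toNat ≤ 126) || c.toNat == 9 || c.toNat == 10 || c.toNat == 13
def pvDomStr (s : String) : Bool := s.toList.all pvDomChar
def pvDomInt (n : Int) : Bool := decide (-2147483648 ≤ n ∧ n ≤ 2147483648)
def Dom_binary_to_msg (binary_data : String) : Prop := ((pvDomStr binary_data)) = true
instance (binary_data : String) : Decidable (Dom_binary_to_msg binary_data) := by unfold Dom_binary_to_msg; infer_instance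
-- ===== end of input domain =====

-- B decodes the bit string in one character-level pass, accumulating each byte's value
-- bit by bit instead of slicing 8-char chunks and parsing them with int(byte, 2) (objective: alternative).


-- ===== PORT A =====
-- the end marker '11111110'
def pvMarker : List Char := ['1', '1', '1', '1', '1', '1', '1', '0']

-- the 'for i in range(0, len(binary_data), 8)' loop with its break; 'none' = int(byte, 2) raised ValueError
def binAGo (s : List Char) (i : Nat) (chars : List Char) : Option (List Char) :=
  if _h : i < s.length then
    let byte := PySem.List.slice s (some (i : Int)) (some ((i : Int) + 8))
    if byte = pvMarker then some chars
    else
      match PySem.Int.ofCharsBase? byte 2 with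
      | none => none
      | some n => binAGo s (i + 8) (chars ++ [Char.ofNat n.toNat])
  else some chars
termination_by s.length - i

def binary_to_msg (binary_data : String) : String :=
  match binAGo binary_data.toList 0 [] with
  | some cs => String.ofList cs  -- ''.join(chars)
  | none => ""                   -- unreachable under Pre_ (int() never raises there)

-- ===== PORT B =====
-- one pass over the characters with state (out, val, nbits), as in Source B
def binBGo : List Char → List Char → Nat → Nat → List Char
  | [], out, val, nbits => if nbits ≠ 0 then out ++ [Char.ofNat val] else out
  | c :: rest, out, val, nbits =>
    let val' := val * 2 + (if c = '1' then 1 else 0)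
    if nbits + 1 = 8 then
      if val' = 254 then out
      else binBGo rest (out ++ [Char.ofNat val']) 0 0
    else binBGo rest out val' (nbits + 1)

def binary_to_msg_alt (binary_data : String) : String :=
  String.ofList (binBGo binary_data.toList [] 0 0)

-- ===== PRECONDITION & SPEC =====
-- the 8-char chunk number k of the input (chunk = what A slices at index 8*k)
def pvChunkAt (l : List Char) (k : Nat) : List Char := List.take 8 (List.drop (8 * k) l)

-- no end-marker chunk at position ≤ k
def pvNoMarkerUpTo (l : List Char) (k : Nat) : Bool :=
  (List.range (k + 1)).all fun k' => !(pvChunkAt l k' == pvMarker)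

def pvPre (l : List Char) : Bool :=
  (List.range l.length).all fun k =>
    !(pvNoMarkerUpTo l k) || (pvChunkAt l k).all fun c => c == '0' || c == '1'

-- Pre_ excludes strings in which some 8-char chunk before the first aligned end-marker
-- chunk contains a character other than '0'/'1': on those A's int(byte, 2) either raises
-- ValueError or returns a value only through int()'s incidental per-chunk
-- whitespace/underscore tolerance, an artefact no caller of a bit-string decoder relies on.
def Pre_binary_to_msg (binary_data : String) : Prop := pvPre binary_data.toList = true
instance (binary_data : String) : Decidable (Pre_binary_to_msg binary_data) := by
  unfold Pre_binary_to_msg; infer_instance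

def pvWitness_binary_to_msg : String := "01000001"

def Spec_binary_to_msg (binary_data : String) (out : String) : Prop :=
  out = binary_to_msg_alt binary_data
instance (binary_data : String) (out : String) : Decidable (Spec_binary_to_msg binary_data out) := by
  unfold Spec_binary_to_msg; infer_instance

-- ===== CLAIM (what is proved, stated in full; the proofs are below) =====
def Claim_equal_binary_to_msg : Prop := ∀ (binary_data : String), Dom_binary_to_msg binary_data → Pre_binary_to_msg binary_data → Spec_binary_to_msg binary_data (binary_to_msg binary_data)

-- ===== LEMMAS AND PROOFS =====

-- the value of the bits of b appended (MSB first) onto an already accumulated value v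
def pvFoldv (v : Nat) (b : List Char) : Nat :=
  b.foldl (fun a c => a * 2 + (if c = '1' then 1 else 0)) v

theorem pvFoldv_nil (v : Nat) : pvFoldv v [] = v := rfl

theorem pvFoldv_cons (v : Nat) (c : Char) (b : List Char) :
    pvFoldv v (c :: b) = pvFoldv (v * 2 + (if c = '1' then 1 else 0)) b := rfl

-- a suffix on which A completes: chunks are binary until an aligned end marker (or the end)
inductive PvGood : List Char → Prop
  | base : PvGood []
  | stop (l : List Char) : List.take 8 l = pvMarker → PvGood l
  | step (l : List Char) : List.take 8 l ≠ pvMarker →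
      (∀ c ∈ List.take 8 l, c = '0' ∨ c = '1') → PvGood (List.drop 8 l) → PvGood l

-- B's accumulator is a pure prefix
theorem binBGo_out (l : List Char) : ∀ (out : List Char) (val nbits : Nat),
    binBGo l out val nbits = out ++ binBGo l [] val nbits := by
  induction l with
  | nil => intro out val nbits; simp [binBGo]; split <;> simp
  | cons c rest ih =>
      intro out val nbits
      simp only [binBGo]
      by_cases h8 : nbits + 1 = 8
      · simp only [if_pos h8]
        by_cases hv : val * 2 + (if c = '1' then 1 else 0) = 254
        · simp [hv]
        · simp only [if_neg hv]
          rw [ih (out ++ _), ih ([] ++ _)]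
          simp
      · simp only [if_neg h8]
        exact ih out _ _

-- running B through one full byte
theorem binBGo_run (b : List Char) : ∀ (rest out : List Char) (val nbits : Nat),
    nbits + b.length = 8 → 0 < b.length →
    binBGo (b ++ rest) out val nbits =
      if pvFoldv val b = 254 then out
      else binBGo rest (out ++ [Char.ofNat (pvFoldv val b)]) 0 0 := by
  induction b with
  | nil => intro _ _ _ _ _ h; simp at h
  | cons c b ih =>
      intro rest out val nbits h8 _
      simp only [List.cons_append, binBGo, pvFoldv_cons]
      rcases b with _ | ⟨d, b⟩
      · simp at h8
        simp [h8, pvFoldv_nil]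
      · have hlt : nbits + 1 ≠ 8 := by simp at h8 ⊢; omega
        simp only [if_neg hlt]
        exact ih rest out _ (nbits + 1) (by simp at h8 ⊢; omega) (by simp)

-- running B through a final partial byte
theorem binBGo_partial (b : List Char) : ∀ (out : List Char) (val nbits : Nat),
    0 < nbits + b.length → nbits + b.length < 8 →
    binBGo b out val nbits = out ++ [Char.ofNat (pvFoldv val b)] := by
  induction b with
  | nil =>
      intro out val nbits h0 _
      simp at h0
      simp [binBGo, pvFoldv_nil, Nat.pos_iff_ne_zero.mp h0]
  | cons c b ih =>
      intro out val nbits _ h8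
      simp only [binBGo, pvFoldv_cons]
      have hlt : nbits + 1 ≠ 8 := by simp at h8; omega
      simp only [if_neg hlt]
      exact ih out _ (nbits + 1) (by omega) (by simp at h8 ⊢; omega)

-- per-chunk facts: int(byte, 2) parses a nonempty binary byte to its bit value,
-- and the byte is the marker iff it has 8 bits of value 254
theorem pvChunk (b : List Char) (hb : ∀ c ∈ b, c = '0' ∨ c = '1')
    (h1 : 0 < b.length) (h8 : b.length ≤ 8) :
    PySem.Int.ofCharsBase? b 2 = some (pvFoldv 0 b : Int) ∧
      (b = pvMarker ↔ (b.length = 8 ∧ pvFoldv 0 b = 254)) := by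
  rcases b with _ | ⟨c0, _ | ⟨c1, _ | ⟨c2, _ | ⟨c3, _ | ⟨c4, _ | ⟨c5, _ | ⟨c6, _ | ⟨c7, _ | ⟨c8, b⟩⟩⟩⟩⟩⟩⟩⟩⟩
  · simp at h1
  all_goals simp only [List.mem_cons, List.not_mem_nil, or_false, forall_eq_or_imp,
    forall_eq] at hb
  · rcases hb with rfl | rfl <;> decide
  · rcases hb with ⟨rfl | rfl, rfl | rfl⟩ <;> decide
  · rcases hb with ⟨rfl | rfl, rfl | rfl, rfl | rfl⟩ <;> decide
  · rcases hb with ⟨rfl | rfl, rfl | rfl, rfl | rfl, rfl | rfl⟩ <;> decide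
  · rcases hb with ⟨rfl | rfl, rfl | rfl, rfl | rfl, rfl | rfl, rfl | rfl⟩ <;> decide
  · rcases hb with ⟨rfl | rfl, rfl | rfl, rfl | rfl, rfl | rfl, rfl | rfl, rfl | rfl⟩ <;> decide
  · rcases hb with ⟨rfl | rfl, rfl | rfl, rfl | rfl, rfl | rfl, rfl | rfl, rfl | rfl, rfl | rfl⟩ <;> decide
  · rcases hb with ⟨rfl | rfl, rfl | rfl, rfl | rfl, rfl | rfl, rfl | rfl, rfl | rfl, rfl | rfl, rfl | rfl⟩ <;> decide
  · simp only [List.length_cons] at h8; omega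

theorem pvChunkAt_drop (l : List Char) (k : Nat) :
    pvChunkAt (List.drop 8 l) k = pvChunkAt l (k + 1) := by
  unfold pvChunkAt
  rw [List.drop_drop]
  congr 2
  ring

-- the first chunk of a pvPre-good nonempty list with no leading marker is binary
theorem pvPre_chunk0 (l : List Char) (hl : l ≠ [])
    (hm : pvChunkAt l 0 ≠ pvMarker) (hp : pvPre l = true) :
    ∀ c ∈ pvChunkAt l 0, c = '0' ∨ c = '1' := by
  have h0 := List.all_eq_true.mp hp 0 (by
    simp [List.mem_range]
    exact List.length_pos_iff.mpr hl)
  have hnm : pvNoMarkerUpTo l 0 = true := by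
    simp [pvNoMarkerUpTo]
    exact hm
  rw [hnm] at h0
  simp only [Bool.not_true, Bool.false_or, List.all_eq_true] at h0
  intro c hc
  have := h0 c hc
  simp at this
  exact this

-- pvPre passes to the tail after a non-marker chunk
theorem pvPre_drop (l : List Char) (hm : pvChunkAt l 0 ≠ pvMarker)
    (hp : pvPre l = true) : pvPre (List.drop 8 l) = true := by
  rw [pvPre, List.all_eq_true]
  intro k hk
  simp only [List.mem_range, List.length_drop] at hk
  by_cases hnm : pvNoMarkerUpTo (List.drop 8 l) k = true
  · have hnm' : pvNoMarkerUpTo l (k + 1) = true := by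
      rw [pvNoMarkerUpTo, List.all_eq_true]
      intro j hj
      simp only [List.mem_range] at hj
      rcases j with _ | j
      · simpa using hm
      · have := List.all_eq_true.mp hnm j (by simp [List.mem_range]; omega)
        simpa [pvChunkAt_drop] using this
    have hmem : k + 1 ∈ List.range l.length := by simp [List.mem_range]; omega
    have := List.all_eq_true.mp hp (k + 1) hmem
    rw [hnm'] at this
    simp only [Bool.not_true, Bool.false_or] at this
    rw [hnm]
    simpa [pvChunkAt_drop] using this
  · simp [Bool.eq_false_iff.mpr hnm]

-- every pvPre-good list is PvGood
theorem pvGood_of_pre : ∀ (n : Nat) (l : List Char), l.length ≤ n → pvPre l = true → PvGood l := by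
  intro n
  induction n with
  | zero =>
      intro l hl _
      have : l = [] := List.eq_nil_of_length_eq_zero (by omega)
      exact this ▸ PvGood.base
  | succ n ih =>
      intro l hl hp
      rcases eq_or_ne l [] with rfl | hne
      · exact PvGood.base
      · by_cases hm : List.take 8 l = pvMarker
        · exact PvGood.stop l hm
        · have hm0 : pvChunkAt l 0 ≠ pvMarker := by simpa [pvChunkAt] using hm
          refine PvGood.step l hm ?_ ?_
          · simpa [pvChunkAt] using pvPre_chunk0 l hne hm0 hp
          · exact ih (List.drop 8 l)
              (by simp; have := List.length_pos_iff.mpr hne; omega)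
              (pvPre_drop l hm0 hp)

-- the main loop correspondence: A from index i equals B run on the remaining suffix
theorem pvMain (s : List Char) :
    ∀ (i : Nat) (acc : List Char), PvGood (List.drop i s) →
      binAGo s i acc = some (acc ++ binBGo (List.drop i s) [] 0 0) := by
  intro i
  induction hn : s.length - i using Nat.strong_induction_on generalizing i with
  | _ n ih =>
  intro acc hg
  by_cases h : i < s.length
  · have hdrop : PySem.List.slice s (some (i : Int)) (some ((i : Int) + 8)) =
        List.take 8 (List.drop i s) := by
      rw [PySem.List.slice_toNat s (by positivity) (by positivity)]
      have h8 : ((i : Int) + 8).toNat = i + 8 := by omega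
      have hi : ((i : Int)).toNat = i := by omega
      rw [h8, hi]
      congr 1
      omega
    set t := List.drop i s with hT
    clear_value t
    have ht1 : 0 < t.length := by simp [hT]; omega
    rw [binAGo]
    simp only [h, dif_pos, hdrop]
    by_cases hm : List.take 8 t = pvMarker
    · simp only [hm, if_true]
      have hl8 : 8 ≤ t.length := by
        have := congrArg List.length hm
        simp [pvMarker] at this
        omega
      have hsplit : t = pvMarker ++ List.drop 8 t := by
        conv_lhs => rw [← List.take_append_drop 8 t]
        rw [hm]
      rw [hsplit, binBGo_run pvMarker (List.drop 8 t) [] 0 0 (by decide) (by decide)]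
      simp [show pvFoldv 0 pvMarker = 254 from by decide]
    · rcases hg with _ | ⟨_, hmk⟩ | ⟨_, _, hbyte, hrest⟩
      · simp at ht1
      · exact absurd hmk hm
      simp only [hm, if_false]
      have hblen1 : 0 < (List.take 8 t).length := by simp; omega
      have hblen8 : (List.take 8 t).length ≤ 8 := by simp
      obtain ⟨hparse, hmark⟩ := pvChunk (List.take 8 t) hbyte hblen1 hblen8
      rw [hparse]
      simp only [Int.toNat_natCast]
      have hd8 : List.drop 8 t = List.drop (i + 8) s := by
        rw [hT, List.drop_drop]
      by_cases hlen : 8 ≤ t.length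
      · have hgrest : PvGood (List.drop (i + 8) s) := hd8 ▸ hrest
        rw [ih (s.length - (i + 8)) (by omega) (i + 8) rfl _ hgrest]
        have hl8 : (List.take 8 t).length = 8 := by simp; omega
        have hv : pvFoldv 0 (List.take 8 t) ≠ 254 := fun hv => hm (hmark.mpr ⟨hl8, hv⟩)
        conv_rhs => rw [← List.take_append_drop 8 t]
        rw [binBGo_run _ _ [] 0 0 (by omega) (by omega)]
        rw [if_neg hv, hd8,
          binBGo_out (List.drop (i + 8) s) ([] ++ [Char.ofNat (pvFoldv 0 (List.take 8 t))])]
        simp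
      · have hdrop8 : List.drop (i + 8) s = [] := by
          apply List.drop_eq_nil_of_le
          simp [hT] at ht1 hlen ⊢
          omega
        rw [ih (s.length - (i + 8)) (by omega) (i + 8) rfl _ (hdrop8 ▸ PvGood.base)]
        have htake : List.take 8 t = t := List.take_of_length_le (by omega)
        rw [htake, hdrop8]
        rw [binBGo_partial t [] 0 0 (by omega) (by omega)]
        simp [binBGo]
  · rw [binAGo]
    simp only [h, dite_false]
    rw [List.drop_eq_nil_of_le (by omega)]
    simp [binBGo]

-- ===== VERDICT (by name: the statement is the Claim_ definition above) =====
theorem binary_to_msg_spec : Claim_equal_binary_to_msg := by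
  intro s _ hpre
  unfold Spec_binary_to_msg binary_to_msg binary_to_msg_alt
  rw [pvMain s.toList 0 [] (pvGood_of_pre s.toList.length _ le_rfl hpre)]
  simp
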